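-- pv_equiv track=rewrite | github.com/dontbesuchaquack/CMPS150 | pa7 copy.py | below
-- ===== SOURCE A (Python) =====
-- def below(myList,avg):
--     belowList = []
--     count = 0
--     for x in range(len(myList)):
--         if myList[x] < avg and myList[x] >= avg - 10:
--             belowList.append(myList[x])
--             count = count + 1
--     return count
-- ===== SOURCE B (Python) =====
-- def below(myList, avg):
--     lo = avg - 10
--     under_avg = len([x for x in myList if x < avg])
--     under_lo = len([x for x in myList if x < lo])
--     return under_avg - under_lo
-- ===== Notes on version B (the rewrite author's own statement) =====
-- stated objective: alternative
-- what changed: Replaces the index loop with a compound range test (and the dead belowList) by two separately-predicated linear counts (x < avg and x < avg-10) combined by subtraction.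
import Mathlib
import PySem

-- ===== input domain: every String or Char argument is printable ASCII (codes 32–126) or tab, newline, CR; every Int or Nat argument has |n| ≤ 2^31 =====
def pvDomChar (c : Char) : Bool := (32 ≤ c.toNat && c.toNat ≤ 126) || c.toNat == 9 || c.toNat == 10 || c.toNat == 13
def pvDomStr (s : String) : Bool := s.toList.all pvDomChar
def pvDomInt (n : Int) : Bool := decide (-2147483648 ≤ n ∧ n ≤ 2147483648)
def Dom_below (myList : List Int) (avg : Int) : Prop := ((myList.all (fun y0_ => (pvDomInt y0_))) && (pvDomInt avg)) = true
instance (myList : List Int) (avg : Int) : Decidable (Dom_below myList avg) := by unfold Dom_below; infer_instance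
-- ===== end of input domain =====

-- B replaces A's single compound-conditional index loop by two separately-predicated
-- counts combined by subtraction (alternative decomposition, same cost).

-- ===== PORT A =====
def below (myList : List Int) (avg : Int) : Int :=
  ((PySem.List.pyRange 0 myList.length 1).foldl
    (fun (st : List Int × Int) x =>
      if PySem.List.pyGetD myList x 0 < avg ∧ PySem.List.pyGetD myList x 0 ≥ avg - 10 then
        (st.1 ++ [PySem.List.pyGetD myList x 0], st.2 + 1)
      else st)
    ([], 0)).2

-- ===== PORT B =====
def below_alt (myList : List Int) (avg : Int) : Int :=
  let lo := avg - 10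
  let underAvg : Int := (myList.filter (fun x => decide (x < avg))).length
  let underLo : Int := (myList.filter (fun x => decide (x < lo))).length
  underAvg - underLo

-- ===== PRECONDITION & SPEC =====
def Spec_below (myList : List Int) (avg : Int) (out : Int) : Prop := out = below_alt myList avg
instance (myList : List Int) (avg : Int) (out : Int) : Decidable (Spec_below myList avg out) := by unfold Spec_below; infer_instance

-- ===== CLAIM (what is proved, stated in full; the proofs are below) =====
def Claim_equal_below : Prop := ∀ (myList : List Int) (avg : Int), Dom_below myList avg → Spec_below myList avg (below myList avg)

-- ===== LEMMAS AND PROOFS =====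

-- the count accumulated by A's fold, over any list and accumulator
theorem below_fold_snd (avg : Int) (l : List Int) (st : List Int × Int) :
    (l.foldl (fun (st : List Int × Int) v =>
        if v < avg ∧ v ≥ avg - 10 then (st.1 ++ [v], st.2 + 1) else st) st).2
      = st.2 + ((l.filter (fun v => decide (v < avg ∧ v ≥ avg - 10))).length : Int) := by
  induction l generalizing st with
  | nil => simp
  | cons x xs ih =>
    rw [List.foldl_cons]
    by_cases h : x < avg ∧ x ≥ avg - 10
    · rw [if_pos h, ih, List.filter_cons, if_pos (by simpa using h)]
      simp only [List.length_cons]; push_cast; omega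
    · rw [if_neg h, ih, List.filter_cons, if_neg (by simpa using h)]

-- the band count equals the difference of the two one-sided counts
theorem band_count (avg : Int) (l : List Int) :
    ((l.filter (fun v => decide (v < avg ∧ v ≥ avg - 10))).length : Int)
      = ((l.filter (fun x => decide (x < avg))).length : Int)
        - ((l.filter (fun x => decide (x < avg - 10))).length : Int) := by
  induction l with
  | nil => simp
  | cons x xs ih =>
    rw [List.filter_cons, List.filter_cons, List.filter_cons]
    split_ifs <;> simp only [decide_eq_true_eq, ge_iff_le, not_and, not_lt, List.length_cons] at * <;>
      push_cast <;> omega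

-- ===== VERDICT (by name: the statement is the Claim_ definition above) =====
theorem below_spec : Claim_equal_below := by
  intro myList avg _
  unfold Spec_below below below_alt
  rw [PySem.List.foldl_pyRange_zero_pyGetD' myList 0
        (fun (st : List Int × Int) v =>
          if v < avg ∧ v ≥ avg - 10 then (st.1 ++ [v], st.2 + 1) else st) ([], 0)]
  rw [below_fold_snd]
  simp only [zero_add]
  rw [band_count]
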